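-- pv_equiv track=rewrite | github.com/erichan1/CS1 | midterm/midterm.py | get_bet_info
-- ===== SOURCE A (Python) =====
-- def get_bet_info(bets, cwins):
--     '''
--     Select the next bet information for a gambling system.
--
--     Arguments:
--       bets  -- the list of bets set by the gambling system
--       cwins -- the consecutive wins (0, 1) previously
--
--     Result:
--       a two tuple containing:
--       -- the bet amount;
--       -- the indices of the 'bets' array where the bet amount was taken from
--     '''
--     assert len(bets) > 0
--     for bet in bets:
--         assert bet > 0
--     assert cwins in [0, 1, 2]
--
--     if(cwins == 0):
--         return (bets[0], [0])
--     if(cwins == 1):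
--         if(len(bets) > 1):
--             return (bets[0] + bets[len(bets)-1], [0, len(bets)-1])
--         else:
--             return (bets[0], [0])
--     if(cwins == 2):
--         if(len(bets) > 2):
--             return (bets[0] + bets[1] + bets[len(bets)-1], [0, 1, len(bets)-1])
--         elif(len(bets) > 1):
--             return (bets[0] + bets[len(bets)-1], [0, len(bets)-1])
--         else:
--             return (bets[0], [0])
-- ===== SOURCE B (Python) =====
-- def get_bet_info(bets, cwins):
--     assert len(bets) > 0
--     assert all(b > 0 for b in bets)
--     assert cwins in [0, 1, 2]
--     n = len(bets)
--     idx = [0] if cwins == 0 else list(range(min(cwins, n - 1))) + [n - 1]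
--     amount = bets[idx[0]]
--     for i in idx[1:]:
--         amount += bets[i]
--     return (amount, idx)
-- ===== Notes on version B (the rewrite author's own statement) =====
-- stated objective: simpler
-- what changed: Replaces the nested per-cwins/per-length case cascade by a computed index list (range(min(cwins, n-1)) plus the last index) and one uniform accumulation pass over those indices.
import Mathlib
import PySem

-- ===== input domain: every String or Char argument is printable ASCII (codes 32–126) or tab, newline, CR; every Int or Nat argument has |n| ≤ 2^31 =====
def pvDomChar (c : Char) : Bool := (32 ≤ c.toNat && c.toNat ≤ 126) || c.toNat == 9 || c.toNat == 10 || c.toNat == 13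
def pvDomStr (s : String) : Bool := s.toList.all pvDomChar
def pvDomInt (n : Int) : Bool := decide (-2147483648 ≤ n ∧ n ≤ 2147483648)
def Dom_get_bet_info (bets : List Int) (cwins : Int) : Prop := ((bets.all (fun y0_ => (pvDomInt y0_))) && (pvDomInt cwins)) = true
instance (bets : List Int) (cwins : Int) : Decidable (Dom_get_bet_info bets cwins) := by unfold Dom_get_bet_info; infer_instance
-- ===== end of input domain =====

-- B replaces A's nested case cascade by a computed index list plus one accumulation pass (objective: simpler).

-- ===== PORT A =====
-- A's asserts are excluded by Pre_; out-of-range list access uses pyGet? (cannot fire inside Pre_).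
def get_bet_info (bets : List Int) (cwins : Int) : Int × List Int :=
  let n : Int := bets.length
  if cwins = 0 then ((PySem.List.pyGet? bets 0).getD 0, [0])
  else if cwins = 1 then
    if n > 1 then
      ((PySem.List.pyGet? bets 0).getD 0 + (PySem.List.pyGet? bets (n - 1)).getD 0, [0, n - 1])
    else ((PySem.List.pyGet? bets 0).getD 0, [0])
  else
    if n > 2 then
      ((PySem.List.pyGet? bets 0).getD 0 + (PySem.List.pyGet? bets 1).getD 0 +
        (PySem.List.pyGet? bets (n - 1)).getD 0, [0, 1, n - 1])
    else if n > 1 then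
      ((PySem.List.pyGet? bets 0).getD 0 + (PySem.List.pyGet? bets (n - 1)).getD 0, [0, n - 1])
    else ((PySem.List.pyGet? bets 0).getD 0, [0])

-- ===== PORT B =====
def get_bet_info_alt (bets : List Int) (cwins : Int) : Int × List Int :=
  let n : Int := bets.length
  let idx : List Int :=
    if cwins = 0 then [0] else PySem.List.pyRange 0 (min cwins (n - 1)) 1 ++ [n - 1]
  let amount : Int :=
    idx.tail.foldl (fun acc i => acc + (PySem.List.pyGet? bets i).getD 0)
      ((PySem.List.pyGet? bets (idx.headD 0)).getD 0)
  (amount, idx)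

-- ===== PRECONDITION & SPEC =====
-- Pre_ excludes exactly the inputs on which A's asserts raise AssertionError.
def Pre_get_bet_info (bets : List Int) (cwins : Int) : Prop :=
  bets ≠ [] ∧ (∀ b ∈ bets, b > 0) ∧ (cwins = 0 ∨ cwins = 1 ∨ cwins = 2)
instance (bets : List Int) (cwins : Int) : Decidable (Pre_get_bet_info bets cwins) := by
  unfold Pre_get_bet_info; infer_instance
def pvWitness_get_bet_info : List Int × Int := ([2, 3, 5], 2)

def Spec_get_bet_info (bets : List Int) (cwins : Int) (out : Int × List Int) : Prop :=
  out = get_bet_info_alt bets cwins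
instance (bets : List Int) (cwins : Int) (out : Int × List Int) : Decidable (Spec_get_bet_info bets cwins out) := by
  unfold Spec_get_bet_info; infer_instance

-- ===== CLAIM (what is proved, stated in full; the proofs are below) =====
def Claim_equal_get_bet_info : Prop := ∀ (bets : List Int) (cwins : Int), Dom_get_bet_info bets cwins → Pre_get_bet_info bets cwins → Spec_get_bet_info bets cwins (get_bet_info bets cwins)

-- ===== LEMMAS AND PROOFS =====

-- ===== VERDICT (by name: the statement is the Claim_ definition above) =====
theorem get_bet_info_spec : Claim_equal_get_bet_info := by
  intro bets cwins _ hpre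
  obtain ⟨hne, _, hc⟩ := hpre
  have hn1 : (1 : Int) ≤ (bets.length : Int) := by
    have := List.length_pos_iff.mpr hne; omega
  unfold Spec_get_bet_info get_bet_info get_bet_info_alt
  rcases hc with rfl | rfl | rfl
  · simp
  · simp only [if_neg (by decide : ¬(1:Int) = 0)]
    by_cases h : ((bets.length : Int) > 1)
    · rw [if_pos h]
      have hmin : min (1 : Int) ((bets.length : Int) - 1) = 1 := by omega
      rw [hmin]
      simp [PySem.List.pyRange_one, List.range_succ]
    · rw [if_neg h]
      have hlen : (bets.length : Int) = 1 := by omega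
      have hmin : min (1 : Int) ((bets.length : Int) - 1) = 0 := by omega
      rw [hmin, hlen]
      simp
  · simp only [if_neg (by decide : ¬(2:Int) = 0), if_neg (by decide : ¬(2:Int) = 1)]
    by_cases h2 : ((bets.length : Int) > 2)
    · rw [if_pos h2]
      have hmin : min (2 : Int) ((bets.length : Int) - 1) = 2 := by omega
      rw [hmin]
      simp [PySem.List.pyRange_one, List.range_succ]
    · rw [if_neg h2]
      by_cases h1 : ((bets.length : Int) > 1)
      · rw [if_pos h1]
        have hlen : (bets.length : Int) = 2 := by omega
        have hmin : min (2 : Int) ((bets.length : Int) - 1) = 1 := by omega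
        rw [hmin, hlen]
        simp [PySem.List.pyRange_one, List.range_succ]
      · rw [if_neg h1]
        have hlen : (bets.length : Int) = 1 := by omega
        have hmin : min (2 : Int) ((bets.length : Int) - 1) = 0 := by omega
        rw [hmin, hlen]
        simp
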